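-- pv_equiv track=rewrite | github.com/Luis000923/Web_security_scanner | web_security_scanner/web_security_scanner.py | smart_payload_selection
-- ===== SOURCE A (Python) =====
-- def smart_payload_selection(payloads, technology_info=None):
--     if not technology_info:
--         return payloads
--     prioritized = []
--     standard = []
--     for payload in payloads:
--         if any(tech.lower() in payload.lower() for tech in technology_info.get('databases', [])):
--             prioritized.append(payload)
--         elif any(tech.lower() in payload.lower() for tech in technology_info.get('languages', [])):
--             prioritized.append(payload)
--         else:
--             standard.append(payload)
--     return prioritized + standard
-- ===== SOURCE B (Python) =====
-- def smart_payload_selection(payloads, technology_info=None):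
--     if not technology_info:
--         return payloads
--     techs = [t.lower() for t in technology_info.get('databases', []) + technology_info.get('languages', [])]
--     return sorted(payloads, key=lambda p: 0 if any(t in p.lower() for t in techs) else 1)
-- ===== Notes on version B (the rewrite author's own statement) =====
-- stated objective: simpler
-- what changed: Replaces the two-bucket partition loop (prioritized/standard accumulators, then concatenation) by a single stable sort keyed 0/1 on a merged lowercase tech list precomputed once; stability makes the result identical.
import Mathlib
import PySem

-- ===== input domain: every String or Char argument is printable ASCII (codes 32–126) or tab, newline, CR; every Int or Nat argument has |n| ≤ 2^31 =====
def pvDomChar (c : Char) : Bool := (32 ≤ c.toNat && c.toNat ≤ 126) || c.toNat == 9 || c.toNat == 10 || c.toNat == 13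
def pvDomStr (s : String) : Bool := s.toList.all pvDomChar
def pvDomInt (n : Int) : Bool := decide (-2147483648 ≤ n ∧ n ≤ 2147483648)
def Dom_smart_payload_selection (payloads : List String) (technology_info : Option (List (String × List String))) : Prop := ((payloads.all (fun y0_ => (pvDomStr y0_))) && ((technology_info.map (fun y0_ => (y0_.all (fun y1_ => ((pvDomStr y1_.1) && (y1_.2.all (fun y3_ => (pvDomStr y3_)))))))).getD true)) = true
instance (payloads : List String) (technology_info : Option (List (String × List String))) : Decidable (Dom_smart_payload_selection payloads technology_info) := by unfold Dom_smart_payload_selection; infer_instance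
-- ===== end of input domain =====

-- ===== PORT A =====
-- B replaces A's two-bucket partition loop by ONE stable sort on a 0/1 key (objective: simpler).
def smart_payload_selection (payloads : List String) (technology_info : Option (List (String × List String))) : List String :=
  match technology_info with
  | none => payloads
  | some d =>
    if d = [] then payloads
    else
      let r := payloads.foldl (fun (acc : List String × List String) payload =>
        if ((PySem.Dict.mk d).getD "databases" []).any
            (fun tech => PySem.Str.isIn (PySem.Str.lower tech) (PySem.Str.lower payload)) then
          (acc.1 ++ [payload], acc.2)
        else if ((PySem.Dict.mk d).getD "languages" []).any
            (fun tech => PySem.Str.isIn (PySem.Str.lower tech) (PySem.Str.lower payload)) then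
          (acc.1 ++ [payload], acc.2)
        else
          (acc.1, acc.2 ++ [payload])) ([], [])
      r.1 ++ r.2

-- ===== PORT B =====
def smart_payload_selection_alt (payloads : List String) (technology_info : Option (List (String × List String))) : List String :=
  match technology_info with
  | none => payloads
  | some d =>
    if d = [] then payloads
    else
      let techs := (((PySem.Dict.mk d).getD "databases" [] ++ (PySem.Dict.mk d).getD "languages" []).map PySem.Str.lower)
      PySem.List.sorted payloads
        (fun p => if techs.any (fun t => PySem.Str.isIn t (PySem.Str.lower p)) then (0 : Int) else 1)

-- ===== PRECONDITION & SPEC =====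
def Spec_smart_payload_selection (payloads : List String) (technology_info : Option (List (String × List String))) (out : List String) : Prop := out = smart_payload_selection_alt payloads technology_info
instance (payloads : List String) (technology_info : Option (List (String × List String))) (out : List String) : Decidable (Spec_smart_payload_selection payloads technology_info out) := by unfold Spec_smart_payload_selection; infer_instance

-- ===== CLAIM (what is proved, stated in full; the proofs are below) =====
def Claim_equal_smart_payload_selection : Prop := ∀ (payloads : List String) (technology_info : Option (List (String × List String))), Dom_smart_payload_selection payloads technology_info → Spec_smart_payload_selection payloads technology_info (smart_payload_selection payloads technology_info)

-- ===== LEMMAS AND PROOFS =====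

-- the shared match predicate (B's form): any merged lowercase tech occurs in the lowercase payload
def pvPred (d : List (String × List String)) (x : String) : Bool :=
  (((PySem.Dict.mk d).getD "databases" [] ++ (PySem.Dict.mk d).getD "languages" []).map
    PySem.Str.lower).any (fun t => PySem.Str.isIn t (PySem.Str.lower x))

-- Inserting a key-0 element into (all-key-0 block ++ all-key-1 block) lands between the blocks.
theorem pv_insertBy_true (p : String → Bool) (x : String) (P S : List String)
    (hx : p x = true) (hP : ∀ y ∈ P, p y = true) (hS : ∀ y ∈ S, p y = false) :
    PySem.List.insertBy
      (fun a b => decide ((if p a then (0 : Int) else 1) < (if p b then (0 : Int) else 1)))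
      x (P ++ S) = P ++ x :: S := by
  induction P with
  | nil =>
    cases S with
    | nil => simp [PySem.List.insertBy]
    | cons s S' =>
      have hs := hS s (by simp)
      simp [PySem.List.insertBy, hx, hs]
  | cons a P' ih =>
    have ha := hP a (by simp)
    simp only [List.cons_append, PySem.List.insertBy, hx, ha]
    simp only [decide_eq_true_eq]
    rw [if_neg (by omega)]
    exact congrArg (a :: ·) (ih (fun y hy => hP y (by simp [hy])))

-- Inserting a key-1 element appends it at the end.
theorem pv_insertBy_false (p : String → Bool) (x : String) (L : List String)
    (hx : p x = false) :
    PySem.List.insertBy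
      (fun a b => decide ((if p a then (0 : Int) else 1) < (if p b then (0 : Int) else 1)))
      x L = L ++ [x] := by
  apply PySem.List.insertBy_of_forall_not_before
  intro y _
  by_cases hy : p y <;> simp [hx, hy]

-- The stable insertion-sort fold on the 0/1 key performs exactly the partition.
theorem pv_sort_partition (p : String → Bool) :
    ∀ (xs P S : List String), (∀ y ∈ P, p y = true) → (∀ y ∈ S, p y = false) →
    xs.foldl (fun acc x =>
        PySem.List.insertBy
          (fun a b => decide ((if p a then (0 : Int) else 1) < (if p b then (0 : Int) else 1)))
          x acc) (P ++ S)
      = (P ++ xs.filter p) ++ (S ++ xs.filter (fun x => !p x)) := by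
  intro xs
  induction xs with
  | nil => intro P S _ _; simp
  | cons x xs ih =>
    intro P S hP hS
    by_cases hx : p x
    · rw [List.foldl_cons, pv_insertBy_true p x P S hx hP hS]
      have : P ++ x :: S = (P ++ [x]) ++ S := by simp
      rw [this, ih (P ++ [x]) S
        (by intro y hy; rcases List.mem_append.mp hy with h | h
            · exact hP y h
            · simp at h; subst h; exact hx) hS]
      simp [hx]
    · rw [List.foldl_cons, pv_insertBy_false p x (P ++ S) (by simpa using hx)]
      rw [List.append_assoc, ih P (S ++ [x]) hP
        (by intro y hy; rcases List.mem_append.mp hy with h | h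
            · exact hS y h
            · simp at h; subst h; simpa using hx)]
      simp [hx]

-- A's two-accumulator loop is the partition into (filter, filter-not).
theorem pv_a_partition (p1 p2 : String → Bool) :
    ∀ (xs : List String) (P S : List String),
    xs.foldl (fun (acc : List String × List String) x =>
        if p1 x then (acc.1 ++ [x], acc.2)
        else if p2 x then (acc.1 ++ [x], acc.2)
        else (acc.1, acc.2 ++ [x])) (P, S)
      = (P ++ xs.filter (fun x => p1 x || p2 x), S ++ xs.filter (fun x => !(p1 x || p2 x))) := by
  intro xs
  induction xs with
  | nil => intro P S; simp
  | cons x xs ih =>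
    intro P S
    by_cases h1 : p1 x
    · simp [List.foldl_cons, h1, ih]
    · by_cases h2 : p2 x <;> simp [List.foldl_cons, h1, h2, ih]

-- ===== VERDICT (by name: the statement is the Claim_ definition above) =====
theorem smart_payload_selection_spec : Claim_equal_smart_payload_selection := by
  intro payloads ti _
  unfold Spec_smart_payload_selection smart_payload_selection smart_payload_selection_alt
  cases ti with
  | none => rfl
  | some d =>
    by_cases hd : d = []
    · simp [hd]
    · simp only [hd, if_false]
      have hp' : ∀ y : String,
          ((((PySem.Dict.mk d).getD "databases" [] ++ (PySem.Dict.mk d).getD "languages" []).map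
            PySem.Str.lower).any (fun t => PySem.Str.isIn t (PySem.Str.lower y))) = pvPred d y :=
        fun _ => rfl
      have hpred : ∀ x : String,
          (((PySem.Dict.mk d).getD "databases" ([] : List String)).any
              (fun tech => PySem.Str.isIn (PySem.Str.lower tech) (PySem.Str.lower x))
            || ((PySem.Dict.mk d).getD "languages" ([] : List String)).any
              (fun tech => PySem.Str.isIn (PySem.Str.lower tech) (PySem.Str.lower x))) = pvPred d x := by
        intro x
        simp [pvPred, List.any_map, List.any_append, Function.comp_def,
          PySem.Str.isIn, PySem.Str.toList_lower]
      have hB : PySem.List.sorted payloads (fun x => if pvPred d x then (0 : Int) else 1)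
          = payloads.filter (pvPred d) ++ payloads.filter (fun x => !pvPred d x) := by
        rw [PySem.List.sorted_eq_foldl_insertBy]
        simpa using pv_sort_partition (pvPred d) payloads [] [] (by simp) (by simp)
      rw [pv_a_partition
        (fun x => ((PySem.Dict.mk d).getD "databases" ([] : List String)).any
          (fun tech => PySem.Str.isIn (PySem.Str.lower tech) (PySem.Str.lower x)))
        (fun x => ((PySem.Dict.mk d).getD "languages" ([] : List String)).any
          (fun tech => PySem.Str.isIn (PySem.Str.lower tech) (PySem.Str.lower x)))
        payloads [] []]
      simp only [List.nil_append, hpred, hp']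
      exact hB.symm
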